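-- pv_equiv track=rewrite | github.com/ge-xing/HybridMIM | Pretrain/pretrain_models/deep_unet_v2_64_16.py | cons_stages
-- ===== SOURCE A (Python) =====
-- import copy
--
-- def cons_stages(pools, region):
--     stage = [(copy.deepcopy(region[0]), copy.deepcopy(region[1]))]
--     for pool in reversed(pools):
--         for i, r in enumerate(region):
--             region[i][0] = region[i][0] * pool[0]
--             region[i][1] = region[i][1] * pool[1]
--             region[i][2] = region[i][2] * pool[2]
--         stage.append((copy.deepcopy(region[0]), copy.deepcopy(region[1])))
--
--     return stage
-- ===== SOURCE B (Python) =====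
-- import copy
--
-- def cons_stages(pools, region):
--     origin0 = copy.deepcopy(region[0])
--     origin1 = copy.deepcopy(region[1])
--     # one pass over reversed(pools): componentwise prefix products
--     sx = sy = sz = 1
--     scales = []
--     for pool in reversed(pools):
--         sx *= pool[0]
--         sy *= pool[1]
--         sz *= pool[2]
--         scales.append((sx, sy, sz))
--     # stage[0] is the identity snapshot; each later stage scales the origin
--     stage = [(list(origin0), list(origin1))]
--     for (a, b, c) in scales:
--         s0 = list(origin0)
--         s0[0] = origin0[0] * a
--         s0[1] = origin0[1] * b
--         s0[2] = origin0[2] * c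
--         s1 = list(origin1)
--         s1[0] = origin1[0] * a
--         s1[1] = origin1[1] * b
--         s1[2] = origin1[2] * c
--         stage.append((s0, s1))
--     # replay A's in-place mutation of the argument once with the total product
--     if pools:
--         for r in region:
--             r[0] *= sx
--             r[1] *= sy
--             r[2] *= sz
--     return stage
-- ===== Notes on version B (the rewrite author's own statement) =====
-- stated objective: faster
-- what changed: B computes the componentwise prefix products of reversed(pools) once and scales the two origin rows per stage, instead of re-multiplying every row of region on every pool iteration; the argument mutation is applied once with the total product.
import Mathlib
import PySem

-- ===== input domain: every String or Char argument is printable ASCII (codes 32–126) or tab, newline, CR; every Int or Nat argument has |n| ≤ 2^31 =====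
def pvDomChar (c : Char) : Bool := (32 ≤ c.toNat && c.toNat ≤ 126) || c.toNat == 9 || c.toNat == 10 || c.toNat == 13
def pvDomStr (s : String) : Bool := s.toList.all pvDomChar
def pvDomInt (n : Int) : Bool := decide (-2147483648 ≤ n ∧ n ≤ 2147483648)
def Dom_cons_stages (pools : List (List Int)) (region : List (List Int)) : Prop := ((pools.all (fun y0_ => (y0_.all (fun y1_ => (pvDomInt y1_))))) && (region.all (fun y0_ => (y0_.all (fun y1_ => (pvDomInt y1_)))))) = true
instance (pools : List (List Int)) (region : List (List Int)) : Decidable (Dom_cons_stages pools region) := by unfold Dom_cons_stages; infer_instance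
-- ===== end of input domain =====

-- B replaces A's per-pool remultiplication of every region row by prefix products of
-- reversed(pools) applied to the two origin rows (O(|pools|+|region|) work instead of O(|pools|*|region|)); both
-- Pythons leave the argument's inner lists in the same mutated state, and the
-- equivalence proved here is about the RETURN value.

-- ===== PORT A =====
-- the three indexed in-place assignments region[i][j] = region[i][j] * pool[j];
-- getD/set stand for Python indexing, which raises IndexError exactly outside Pre_
def aStep (pool : List Int) (reg : List Int) : List Int :=
  let reg1 := reg.set 0 (reg.getD 0 0 * pool.getD 0 0)
  let reg2 := reg1.set 1 (reg1.getD 1 0 * pool.getD 1 0)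
  reg2.set 2 (reg2.getD 2 0 * pool.getD 2 0)

def cons_stages (pools : List (List Int)) (region : List (List Int)) : List (List Int × List Int) :=
  let stage0 : List (List Int × List Int) := [(region.getD 0 [], region.getD 1 [])]
  (pools.reverse.foldl
    (fun (st : List (List Int) × List (List Int × List Int)) pool =>
      let reg := st.1.map (fun r => aStep pool r)
      (reg, st.2 ++ [(reg.getD 0 [], reg.getD 1 [])]))
    (region, stage0)).2

-- ===== PORT B =====
-- s0 = list(origin0); s0[0] = origin0[0]*a; s0[1] = origin0[1]*b; s0[2] = origin0[2]*c
def scale3 (s : Int × Int × Int) (r : List Int) : List Int :=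
  ((r.set 0 (r.getD 0 0 * s.1)).set 1 (r.getD 1 0 * s.2.1)).set 2 (r.getD 2 0 * s.2.2)

def cons_stages_alt (pools : List (List Int)) (region : List (List Int)) : List (List Int × List Int) :=
  let o0 := region.getD 0 []
  let o1 := region.getD 1 []
  let scales := (pools.reverse.foldl
    (fun (acc : List (Int × Int × Int) × (Int × Int × Int)) pool =>
      let s := (acc.2.1 * pool.getD 0 0, acc.2.2.1 * pool.getD 1 0, acc.2.2.2 * pool.getD 2 0)
      (acc.1 ++ [s], s))
    ([], (1, 1, 1))).1
  (o0, o1) :: scales.map (fun s => (scale3 s o0, scale3 s o1))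

-- ===== PRECONDITION & SPEC =====
-- Pre_ excludes exactly the inputs where Python A raises IndexError:
-- region must have at least two rows, and when pools is nonempty every pool and every
-- region row must have at least three components.
def Pre_cons_stages (pools : List (List Int)) (region : List (List Int)) : Prop :=
  2 ≤ region.length ∧
  (pools ≠ [] → ((∀ p ∈ pools, 3 ≤ p.length) ∧ (∀ r ∈ region, 3 ≤ r.length)))
instance (pools : List (List Int)) (region : List (List Int)) : Decidable (Pre_cons_stages pools region) := by unfold Pre_cons_stages; infer_instance

def pvWitness_cons_stages : List (List Int) × List (List Int) :=
  ([[2, 2, 2]], [[1, 2, 3], [4, 5, 6]])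

def Spec_cons_stages (pools : List (List Int)) (region : List (List Int)) (out : List (List Int × List Int)) : Prop := out = cons_stages_alt pools region
instance (pools : List (List Int)) (region : List (List Int)) (out : List (List Int × List Int)) : Decidable (Spec_cons_stages pools region out) := by unfold Spec_cons_stages; infer_instance

-- ===== CLAIM (what is proved, stated in full; the proofs are below) =====
def Claim_equal_cons_stages : Prop := ∀ (pools : List (List Int)) (region : List (List Int)), Dom_cons_stages pools region → Pre_cons_stages pools region → Spec_cons_stages pools region (cons_stages pools region)

-- ===== LEMMAS AND PROOFS =====

def trip (p : List Int) : Int × Int × Int := (p.getD 0 0, p.getD 1 0, p.getD 2 0)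

def mulT (a b : Int × Int × Int) : Int × Int × Int := (a.1 * b.1, a.2.1 * b.2.1, a.2.2 * b.2.2)

-- the list of prefix products of (trip p) for p along ps, seeded with s
def pfx : List (List Int) → (Int × Int × Int) → List (Int × Int × Int)
  | [], _ => []
  | p :: ps, s => mulT s (trip p) :: pfx ps (mulT s (trip p))

theorem aStep_eq (p r : List Int) : aStep p r = scale3 (trip p) r := by
  rcases r with _ | ⟨a, _ | ⟨b, _ | ⟨c, t⟩⟩⟩ <;>
    simp [aStep, scale3, trip, List.set, List.getD]

theorem scale3_scale3 (s t : Int × Int × Int) (r : List Int) :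
    scale3 s (scale3 t r) = scale3 (mulT t s) r := by
  rcases r with _ | ⟨a, _ | ⟨b, _ | ⟨c, l⟩⟩⟩ <;>
    simp [scale3, mulT, List.set, List.getD] <;> ring_nf <;> simp

theorem mulT_comm (a b : Int × Int × Int) : mulT a b = mulT b a := by
  simp [mulT, mul_comm]

theorem pfx_mul (ps : List (List Int)) (a b : Int × Int × Int) :
    pfx ps (mulT a b) = (pfx ps a).map (fun s => mulT s b) := by
  induction ps generalizing a with
  | nil => simp [pfx]
  | cons p ps ih =>
    simp [pfx, List.map_cons]
    constructor
    · simp [mulT]; refine ⟨by ring, by ring, by ring⟩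
    · have h : mulT (mulT a b) (trip p) = mulT (mulT a (trip p)) b := by
        simp [mulT]; refine ⟨by ring, by ring, by ring⟩
      rw [h, ih]

theorem b_fold (ps : List (List Int)) (acc : List (Int × Int × Int)) (s : Int × Int × Int) :
    (ps.foldl
      (fun (acc : List (Int × Int × Int) × (Int × Int × Int)) pool =>
        let t := (acc.2.1 * pool.getD 0 0, acc.2.2.1 * pool.getD 1 0, acc.2.2.2 * pool.getD 2 0)
        (acc.1 ++ [t], t)) (acc, s)).1 = acc ++ pfx ps s := by
  induction ps generalizing acc s with
  | nil => simp [pfx]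
  | cons p ps ih =>
    simp only [List.foldl_cons]
    rw [ih]
    simp [pfx, mulT, trip]

theorem map_getD01 (p : List Int) (region : List (List Int)) :
    (region.map (fun r => aStep p r)).getD 0 [] = aStep p (region.getD 0 []) ∧
    (region.map (fun r => aStep p r)).getD 1 [] = aStep p (region.getD 1 []) := by
  rcases region with _ | ⟨x, _ | ⟨y, rest⟩⟩ <;>
    simp [List.getD, aStep]

theorem a_fold (ps : List (List Int)) (region : List (List Int)) (st : List (List Int × List Int)) :
    (ps.foldl
      (fun (st : List (List Int) × List (List Int × List Int)) pool =>
        let reg := st.1.map (fun r => aStep pool r)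
        (reg, st.2 ++ [(reg.getD 0 [], reg.getD 1 [])]))
      (region, st)).2
    = st ++ (pfx ps (1, 1, 1)).map
        (fun s => (scale3 s (region.getD 0 []), scale3 s (region.getD 1 []))) := by
  induction ps generalizing region st with
  | nil => simp [pfx]
  | cons p ps ih =>
    simp only [List.foldl_cons]
    rw [ih]
    obtain ⟨h0, h1⟩ := map_getD01 p region
    have ht : mulT (1, 1, 1) (trip p) = trip p := by simp [mulT]
    rw [h0, h1, aStep_eq, aStep_eq]
    simp only [pfx, ht, List.map_cons, List.append_assoc, List.singleton_append]
    congr 1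
    have hp := pfx_mul ps (1, 1, 1) (trip p)
    rw [ht] at hp
    rw [hp, List.map_map]
    congr 1
    refine List.map_congr_left ?_
    intro s _
    simp only [Function.comp_apply, scale3_scale3]
    rw [mulT_comm]

-- ===== VERDICT (by name: the statement is the Claim_ definition above) =====
theorem cons_stages_spec : Claim_equal_cons_stages := by
  intro pools region _ _
  unfold Spec_cons_stages cons_stages cons_stages_alt
  rw [a_fold, b_fold]
  simp
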